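-- pv_equiv track=rewrite | github.com/eyeoverthink/java-memory-V1 | Fraymus_NEXUS_Edition/attached_assets/phi_code_generator_ui_1770348154604.py | _extract_algorithm_code
-- ===== SOURCE A (Python) =====
-- def _extract_algorithm_code(full_code):
--     """Extract the core algorithm code from generated code (remove boilerplate)"""
--     lines = full_code.split('\n')
--     algorithm_lines = []
--     skip_until_code = True
--     in_main = False
--
--     for line in lines:
--         # Skip header boilerplate
--         if skip_until_code:
--             if line.startswith('def ') or line.startswith('class '):
--                 skip_until_code = False
--             else:
--                 continue
--
--         # Stop at main function
--         if line.startswith('def main():'):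
--             in_main = True
--             break
--
--         # Stop at if __name__ block
--         if 'if __name__' in line:
--             break
--
--         algorithm_lines.append(line)
--
--     return '\n'.join(algorithm_lines).strip()
-- ===== SOURCE B (Python) =====
-- def _extract_algorithm_code(full_code):
--     """Extract the core algorithm code from generated code (remove boilerplate)"""
--     lines = full_code.split('\n')
--     cut = len(lines)   # index of the nearest terminator line at or to the right
--     span = None        # (start, end) slice for the leftmost definition line seen so far
--     for i in range(len(lines) - 1, -1, -1):
--         line = lines[i]
--         if line.startswith('def main():') or 'if __name__' in line:
--             cut = i
--         if line.startswith('def ') or line.startswith('class '):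
--             span = (i, cut)
--     if span is None:
--         return ''
--     return '\n'.join(lines[span[0]:span[1]]).strip()
-- ===== Notes on version B (the rewrite author's own statement) =====
-- stated objective: alternative
-- what changed: Replaces A's forward flag-driven state-machine loop with a single reverse scan over line indices that maintains the nearest-terminator index and the leftmost definition span, then takes one slice and joins it.
import Mathlib
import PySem

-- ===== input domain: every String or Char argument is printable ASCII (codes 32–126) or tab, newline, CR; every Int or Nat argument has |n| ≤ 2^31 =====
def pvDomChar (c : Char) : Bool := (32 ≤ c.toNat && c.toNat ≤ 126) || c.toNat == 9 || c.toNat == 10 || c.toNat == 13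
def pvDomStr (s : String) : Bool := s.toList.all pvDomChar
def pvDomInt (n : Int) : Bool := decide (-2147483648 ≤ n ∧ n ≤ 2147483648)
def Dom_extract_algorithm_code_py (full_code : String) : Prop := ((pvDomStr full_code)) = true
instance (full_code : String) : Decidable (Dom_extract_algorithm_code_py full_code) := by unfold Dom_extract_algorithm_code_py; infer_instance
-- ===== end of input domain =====

-- B replaces A's forward flag-driven state machine with a single REVERSE index scan that
-- maintains the nearest-terminator index and the leftmost definition span, then slices once;
-- same cost, a genuinely different traversal (simpler data flow, no flags).

-- full_code.split('\n'): sep "\n" is nonempty so Str.split? is always some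
def pvLines (s : String) : List String := (PySem.Str.split? s "\n").getD []

-- shared literal line tests (the exact string tests both Pythons write out)
def pvIsStart (l : String) : Bool :=
  PySem.Str.startswith l "def " || PySem.Str.startswith l "class "
def pvIsStop (l : String) : Bool :=
  PySem.Str.startswith l "def main():" || PySem.Str.isIn "if __name__" l

-- ===== PORT A =====
-- A's for-loop with its `skip_until_code` flag and breaks, as one structural recursion
def pvLoopA (skip : Bool) : List String → List String
  | [] => []
  | l :: rest =>
    if skip && !(pvIsStart l) then pvLoopA skip rest      -- 'continue' while skipping boilerplate
    else if PySem.Str.startswith l "def main():" then []  -- break at 'def main():'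
    else if PySem.Str.isIn "if __name__" l then []        -- break at 'if __name__'
    else l :: pvLoopA false rest

def extract_algorithm_code_py (full_code : String) : String :=
  PySem.Str.strip (PySem.Str.join "\n" (pvLoopA true (pvLines full_code)))

-- ===== PORT B =====
-- B's reverse loop 'for i in range(len(lines)-1, -1, -1)' over state (cut, span):
-- the recursion processes the suffix (rightmost lines first), exactly the loop's order.
def pvScanB (i : Nat) : List String → Nat × Option (Nat × Nat)
  | [] => (i, none)                                       -- cut = len(lines), span = None
  | l :: rest =>
    let st := pvScanB (i + 1) rest
    let cut := if pvIsStop l then i else st.1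
    let span := if pvIsStart l then some (i, cut) else st.2
    (cut, span)

def extract_algorithm_code_py_alt (full_code : String) : String :=
  match (pvScanB 0 (pvLines full_code)).2 with
  | none => ""
  | some (s, e) =>
      PySem.Str.strip (PySem.Str.join "\n"
        (PySem.List.slice (pvLines full_code) (some (s : Int)) (some (e : Int))))

-- ===== PRECONDITION & SPEC =====
def Spec_extract_algorithm_code_py (full_code : String) (out : String) : Prop := out = extract_algorithm_code_py_alt full_code
instance (full_code : String) (out : String) : Decidable (Spec_extract_algorithm_code_py full_code out) := by unfold Spec_extract_algorithm_code_py; infer_instance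

-- ===== CLAIM (what is proved, stated in full; the proofs are below) =====
def Claim_equal_extract_algorithm_code_py : Prop := ∀ (full_code : String), Dom_extract_algorithm_code_py full_code → Spec_extract_algorithm_code_py full_code (extract_algorithm_code_py full_code)

-- ===== LEMMAS AND PROOFS =====

-- index of the first terminator line (length if none)
def pvFirstStop (xs : List String) : Nat :=
  (xs.findIdx? (fun l => pvIsStop l)).getD xs.length

-- A's loop after the flag is cleared: collect until a terminator
def pvCollectB : List String → List String
  | [] => []
  | l :: rest => if pvIsStop l then [] else l :: pvCollectB rest

theorem pvLoopA_false_eq_collect (xs : List String) : pvLoopA false xs = pvCollectB xs := by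
  induction xs with
  | nil => rfl
  | cons l rest ih =>
    simp only [pvLoopA, pvCollectB, pvIsStop, Bool.false_and, Bool.or_eq_true]
    split_ifs with h1 h2 h3 <;> simp_all

-- A's whole loop = find the first start, then collect from there
theorem pvLoopA_true_eq (xs : List String) :
    pvLoopA true xs = match xs.findIdx? (fun l => pvIsStart l) with
      | none => []
      | some i => pvCollectB (xs.drop i) := by
  induction xs with
  | nil => rfl
  | cons l rest ih =>
    by_cases h : pvIsStart l = true
    · simp only [pvLoopA, List.findIdx?_cons, h, Bool.not_true, Bool.and_false,
        if_neg (by simp : ¬ false = true)]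
      by_cases h1 : PySem.Str.startswith l "def main():" = true <;>
        by_cases h2 : PySem.Str.isIn "if __name__" l = true <;>
        simp_all [pvCollectB, pvIsStop, pvLoopA_false_eq_collect]
    · simp only [pvLoopA, List.findIdx?_cons, h, Bool.not_false, Bool.and_true, if_true, ih]
      cases hfind : rest.findIdx? (fun l => pvIsStart l) <;> simp

theorem pvFirstStop_cons_true (l : String) (rest : List String) (h : pvIsStop l = true) :
    pvFirstStop (l :: rest) = 0 := by
  simp [pvFirstStop, List.findIdx?_cons, h]

theorem pvFirstStop_cons_false (l : String) (rest : List String) (h : pvIsStop l = false) :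
    pvFirstStop (l :: rest) = pvFirstStop rest + 1 := by
  simp only [pvFirstStop, List.findIdx?_cons, h]
  cases hfind : rest.findIdx? (fun l => pvIsStop l) <;> simp [hfind]

theorem pvCollectB_eq_take (xs : List String) : pvCollectB xs = xs.take (pvFirstStop xs) := by
  induction xs with
  | nil => rfl
  | cons l rest ih =>
    cases h : pvIsStop l with
    | true => simp [pvCollectB, h, pvFirstStop_cons_true l rest h]
    | false => simp [pvCollectB, h, pvFirstStop_cons_false l rest h, List.take_succ_cons, ih]

theorem pvScanB_fst (xs : List String) (i : Nat) : (pvScanB i xs).1 = i + pvFirstStop xs := by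
  induction xs generalizing i with
  | nil => simp [pvScanB, pvFirstStop]
  | cons l rest ih =>
    cases h : pvIsStop l with
    | true => simp [pvScanB, h, pvFirstStop_cons_true l rest h]
    | false => simp [pvScanB, h, pvFirstStop_cons_false l rest h, ih]; omega

theorem pvScanB_snd (xs : List String) (i : Nat) :
    (pvScanB i xs).2 = (xs.findIdx? (fun l => pvIsStart l)).map
      (fun j => (i + j, i + j + pvFirstStop (xs.drop j))) := by
  induction xs generalizing i with
  | nil => rfl
  | cons l rest ih =>
    cases h : pvIsStart l with
    | true =>
      cases hs : pvIsStop l with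
      | true => simp [pvScanB, h, hs, pvFirstStop_cons_true l rest hs, List.findIdx?_cons]
      | false =>
        simp [pvScanB, h, hs, pvScanB_fst, pvFirstStop_cons_false l rest hs, List.findIdx?_cons]
        omega
    | false =>
      simp only [pvScanB, List.findIdx?_cons, h, ih]
      cases hfind : rest.findIdx? (fun l => pvIsStart l) <;> simp [hfind] <;> omega

-- ===== VERDICT (by name: the statement is the Claim_ definition above) =====
theorem extract_algorithm_code_py_spec : Claim_equal_extract_algorithm_code_py := by
  intro full_code _
  unfold Spec_extract_algorithm_code_py extract_algorithm_code_py extract_algorithm_code_py_alt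
  rw [pvLoopA_true_eq, pvScanB_snd]
  cases hfind : (pvLines full_code).findIdx? (fun l => pvIsStart l) with
  | none => simp [PySem.Str.join, PySem.Chars.join, PySem.Str.strip]; rfl
  | some j =>
    simp only [Option.map_some, Nat.zero_add]
    have : ((j : Int) + (pvFirstStop ((pvLines full_code).drop j) : Int))
        = ((j + pvFirstStop ((pvLines full_code).drop j) : Nat) : Int) := by push_cast; ring
    rw [show (some ((j + pvFirstStop ((pvLines full_code).drop j) : Nat) : Int))
        = some ((j : Int) + (pvFirstStop ((pvLines full_code).drop j) : Int)) by rw [this]]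
    rw [PySem.List.slice_natCast_add, pvCollectB_eq_take]
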